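-- pv_equiv track=rewrite | github.com/jooseeruu/CodeExercises-JavaPython | py/codewars/numberdigit.py | numbers_with_digit_inside
-- ===== SOURCE A (Python) =====
-- def numbers_with_digit_inside(x, d):
--     count = 0
--     total_sum = 0
--     product = 1
--
--     for num in range(1, x + 1):
--         if str(d) in str(num):
--             count += 1
--             total_sum += num
--             product *= num
--
--     return [count, total_sum, product]
-- ===== SOURCE B (Python) =====
-- def _pow10(d):
--     # 10**(len(str(d))-1) for d >= 0, computed arithmetically
--     return 1 if d < 10 else 10 * _pow10(d // 10)
--
-- def _hits(m, p, q, d):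
--     # does some aligned decimal window of m (of the digit-length of d) equal d?
--     if m < p:
--         return False
--     if m % q == d:
--         return True
--     return _hits(m // 10, p, q, d)
--
-- def numbers_with_digit_inside(x, d):
--     if d < 0:
--         return [0, 0, 1]  # '-' never occurs in str(n) for n >= 1
--     p = _pow10(d)
--     q = 10 * p
--     count = 0
--     total = 0
--     prod = 1
--     for n in range(1, x + 1):
--         if _hits(n, p, q, d):
--             count += 1
--             total += n
--             prod *= n
--     return [count, total, prod]
-- ===== Notes on version B (the rewrite author's own statement) =====
-- stated objective: alternative
-- what changed: Replaces A's per-number string conversion and substring search by a purely arithmetic algorithm: precompute p=10^(len(str(d))-1) once, test membership by sliding a decimal window over n with div/mod (and return [0,0,1] immediately for negative d, whose '-' can never occur in str(n)).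
import Mathlib
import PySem

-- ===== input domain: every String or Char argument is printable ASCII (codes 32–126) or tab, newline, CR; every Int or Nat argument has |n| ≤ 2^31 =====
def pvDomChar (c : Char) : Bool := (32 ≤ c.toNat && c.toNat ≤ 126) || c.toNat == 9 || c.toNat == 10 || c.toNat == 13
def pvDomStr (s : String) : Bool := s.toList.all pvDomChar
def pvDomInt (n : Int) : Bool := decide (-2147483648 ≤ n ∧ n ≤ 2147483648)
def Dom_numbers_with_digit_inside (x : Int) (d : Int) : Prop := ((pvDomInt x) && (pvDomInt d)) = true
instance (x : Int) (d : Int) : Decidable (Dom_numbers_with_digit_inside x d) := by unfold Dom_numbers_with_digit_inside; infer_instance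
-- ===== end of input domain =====

-- B replaces A's per-number string conversion and substring search by a purely
-- arithmetic decimal-window scan (div/mod only; negative d can never match), a
-- genuinely different membership algorithm of similar cost (objective: alternative).

-- ===== PORT A =====
def numbers_with_digit_inside (x : Int) (d : Int) : List Int :=
  let st := (PySem.List.pyRange 1 (x + 1) 1).foldl
    (fun (st : Int × Int × Int) num =>
      if PySem.Str.isIn (PySem.Int.toStr d) (PySem.Int.toStr num) then
        (st.1 + 1, st.2.1 + num, st.2.2 * num)
      else st)
    (0, 0, 1)
  [st.1, st.2.1, st.2.2]

-- ===== PORT B =====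
-- Source B's _pow10: 10^(number of decimal digits of d minus 1); exact on Nat since d ≥ 0 there.
def pvPow (d : Nat) : Nat :=
  if d < 10 then 1 else 10 * pvPow (d / 10)
  termination_by d
  decreasing_by exact Nat.div_lt_self (by omega) (by omega)

-- Source B's _hits: does some aligned decimal window of m equal d?  The 'm = 0' branch is a
-- totality guard only: Python's recursion always has p ≥ 1, so m = 0 already hits 'm < p'.
def pvHits (m p q dn : Nat) : Bool :=
  if m < p then false
  else if m % q = dn then true
  else if m = 0 then false
  else pvHits (m / 10) p q dn
  termination_by m
  decreasing_by exact Nat.div_lt_self (by omega) (by omega)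

-- Nat '/' and '%' coincide with Python's '//' and '%' here because d ≥ 0 and every n ≥ 1.
def numbers_with_digit_inside_alt (x : Int) (d : Int) : List Int :=
  if d < 0 then [0, 0, 1]
  else
    let p := pvPow d.toNat
    let q := 10 * p
    let st := (PySem.List.pyRange 1 (x + 1) 1).foldl
      (fun (st : Int × Int × Int) n =>
        if pvHits n.toNat p q d.toNat then (st.1 + 1, st.2.1 + n, st.2.2 * n) else st)
      (0, 0, 1)
    [st.1, st.2.1, st.2.2]

-- ===== PRECONDITION & SPEC =====
def Spec_numbers_with_digit_inside (x : Int) (d : Int) (out : List Int) : Prop := out = numbers_with_digit_inside_alt x d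
instance (x : Int) (d : Int) (out : List Int) : Decidable (Spec_numbers_with_digit_inside x d out) := by unfold Spec_numbers_with_digit_inside; infer_instance

-- ===== CLAIM (what is proved, stated in full; the proofs are below) =====
def Claim_equal_numbers_with_digit_inside : Prop := ∀ (x : Int) (d : Int), Dom_numbers_with_digit_inside x d → Spec_numbers_with_digit_inside x d (numbers_with_digit_inside x d)

-- ===== LEMMAS AND PROOFS =====

-- the decimal digit string of n (most significant first), = Nat.toDigits 10 n
def pvD (n : Nat) : List Char :=
  if n < 10 then [Nat.digitChar n] else pvD (n / 10) ++ [Nat.digitChar (n % 10)]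
  termination_by n
  decreasing_by exact Nat.div_lt_self (by omega) (by omega)

theorem pvD_small {n : Nat} (h : n < 10) : pvD n = [Nat.digitChar n] := by
  rw [pvD, if_pos h]

theorem pvD_large {n : Nat} (h : 10 ≤ n) : pvD n = pvD (n / 10) ++ [Nat.digitChar (n % 10)] := by
  rw [pvD, if_neg (by omega)]

theorem pvD_ne_nil (n : Nat) : pvD n ≠ [] := by
  rw [pvD]; split <;> simp

theorem pvToDigitsCore_eq : ∀ (f n : Nat) (l : List Char), n < f →
    Nat.toDigitsCore 10 f n l = pvD n ++ l := by
  intro f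
  induction f with
  | zero => intro n l h; omega
  | succ f ih =>
    intro n l h
    by_cases h10 : n / 10 = 0
    · have hn : n < 10 := by omega
      simp only [Nat.toDigitsCore, h10, if_pos]
      rw [pvD_small hn, Nat.mod_eq_of_lt hn]
      simp
    · have hn : 10 ≤ n := by
        by_contra hc
        exact h10 (Nat.div_eq_of_lt (by omega))
      simp only [Nat.toDigitsCore, h10, if_false]
      rw [ih (n / 10) _ (by omega)]
      rw [pvD_large hn]
      simp

theorem pvToChars_nonneg (n : Int) (h : 0 ≤ n) : PySem.Int.toChars n = pvD n.toNat := by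
  unfold PySem.Int.toChars
  rw [if_neg (by omega)]
  show Nat.toDigitsCore 10 (n.toNat + 1) n.toNat [] = pvD n.toNat
  rw [pvToDigitsCore_eq _ _ _ (by omega)]
  simp

theorem pvDigitChar_ne_dash : ∀ k < 10, Nat.digitChar k ≠ '-' := by decide

theorem pvDigitChar_inj : ∀ a < 10, ∀ b < 10, (Nat.digitChar a = Nat.digitChar b ↔ a = b) := by decide

theorem pvD_no_dash : ∀ n : Nat, '-' ∉ pvD n := by
  intro n
  induction n using Nat.strong_induction_on with
  | _ n IH =>
    by_cases h : n < 10
    · rw [pvD_small h]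
      simp only [List.mem_singleton]
      intro hc
      exact pvDigitChar_ne_dash n h hc.symm
    · rw [pvD_large (by omega)]
      simp only [List.mem_append, List.mem_singleton]
      rintro (hc | hc)
      · exact IH (n / 10) (Nat.div_lt_self (by omega) (by omega)) hc
      · exact pvDigitChar_ne_dash (n % 10) (Nat.mod_lt _ (by omega)) hc.symm

theorem pvPow_small {d : Nat} (h : d < 10) : pvPow d = 1 := by
  rw [pvPow, if_pos h]

theorem pvPow_large {d : Nat} (h : 10 ≤ d) : pvPow d = 10 * pvPow (d / 10) := by
  rw [pvPow, if_neg (by omega)]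

theorem pvPow_pos : ∀ d : Nat, 1 ≤ pvPow d := by
  intro d
  induction d using Nat.strong_induction_on with
  | _ d IH =>
    by_cases h : d < 10
    · rw [pvPow_small h]
    · rw [pvPow_large (by omega)]
      have := IH (d / 10) (Nat.div_lt_self (by omega) (by omega))
      omega

-- (10a + r) mod 10m = 10 (a mod m) + r   for r < 10
theorem pvModStep (a r m : Nat) (h : r < 10) : (10 * a + r) % (10 * m) = 10 * (a % m) + r := by
  rcases Nat.eq_zero_or_pos m with hm | hm
  · subst hm; simp
  · have h1 : (10 * a) % (10 * m) = 10 * (a % m) := Nat.mul_mod_mul_left 10 a m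
    have h2 : a % m < m := Nat.mod_lt _ hm
    have h3 : r % (10 * m) = r := Nat.mod_eq_of_lt (by omega)
    calc (10 * a + r) % (10 * m)
        = ((10 * a) % (10 * m) + r % (10 * m)) % (10 * m) := Nat.add_mod _ _ _
      _ = (10 * (a % m) + r) % (10 * m) := by rw [h1, h3]
      _ = 10 * (a % m) + r := Nat.mod_eq_of_lt (by omega)

theorem pvSingletonSuffix (z c : Char) (xs : List Char) : [z] <:+ (xs ++ [c]) ↔ z = c := by
  rw [← List.reverse_prefix]
  simp only [List.reverse_append, List.reverse_singleton, List.singleton_append]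
  rw [List.cons_prefix_cons]
  simp

theorem pvAppendSuffix (a b : List Char) (z c : Char) :
    (a ++ [z]) <:+ (b ++ [c]) ↔ z = c ∧ a <:+ b := by
  rw [← List.reverse_prefix]
  simp only [List.reverse_append, List.reverse_singleton, List.singleton_append]
  rw [List.cons_prefix_cons, List.reverse_prefix]

theorem pvInfixConcat (l xs : List Char) (c : Char) :
    l <:+: (xs ++ [c]) ↔ l <:+ (xs ++ [c]) ∨ l <:+: xs := by
  constructor
  · intro h
    have h' : l.reverse <:+: c :: xs.reverse := by
      simpa [List.reverse_append] using List.reverse_infix.mpr h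
    rcases List.infix_cons_iff.mp h' with hp | hi
    · left
      have : l.reverse <+: (xs ++ [c]).reverse := by simpa [List.reverse_append] using hp
      exact List.reverse_prefix.mp this
    · right
      exact List.reverse_infix.mp hi
  · rintro (h | h)
    · exact h.isInfix
    · exact h.trans (List.prefix_append xs [c]).isInfix

theorem pvInfixSingleton (l : List Char) (c : Char) (hne : l ≠ []) :
    l <:+: [c] ↔ l <:+ [c] := by
  constructor
  · intro h
    rcases List.infix_cons_iff.mp h with hp | h0
    · rcases hp with ⟨t, ht⟩
      cases l with
      | nil => exact absurd rfl hne
      | cons a l' =>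
        simp only [List.cons_append, List.cons.injEq] at ht
        obtain ⟨rfl, ht2⟩ := ht
        have : l' = [] := by
          have := congrArg List.length ht2; simp at this; tauto
        subst this
        exact List.suffix_refl _
    · simp at h0; exact absurd h0 hne
  · intro h; exact h.isInfix

-- the SUFFIX characterisation: pvD dn is a suffix of pvD n  ↔  the low window of n equals dn
theorem pvSuffixChar : ∀ n : Nat, 1 ≤ n → ∀ dn : Nat,
    (pvD dn <:+ pvD n ↔ (pvPow dn ≤ n ∧ n % (10 * pvPow dn) = dn)) := by
  intro n
  induction n using Nat.strong_induction_on with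
  | _ n IH =>
    intro h1 dn
    by_cases hn : n < 10
    · rw [pvD_small hn]
      by_cases hd : dn < 10
      · rw [pvD_small hd, pvPow_small hd]
        have hinj := pvDigitChar_inj dn hd n hn
        constructor
        · intro hs
          have heq : dn = n := by
            have := (pvSingletonSuffix _ _ []).mp (by simpa using hs)
            exact hinj.mp this
          subst heq
          exact ⟨by omega, by rw [Nat.mod_eq_of_lt (by omega)]⟩
        · rintro ⟨-, hm⟩
          rw [Nat.mod_eq_of_lt (by omega)] at hm
          subst hm
          exact List.suffix_refl _
      · have hp : 10 ≤ pvPow dn := by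
          rw [pvPow_large (by omega)]
          have := pvPow_pos (dn / 10); omega
        constructor
        · intro hs
          exfalso
          have hl := hs.length_le
          rw [pvD_large (show (10:Nat) ≤ dn by omega), List.length_append] at hl
          have := List.length_pos_iff.mpr (pvD_ne_nil (dn / 10))
          simp only [List.length_cons, List.length_nil] at hl
          omega
        · rintro ⟨h, -⟩; omega
    · have hn10 : 10 ≤ n := by omega
      rw [pvD_large hn10]
      by_cases hd : dn < 10
      · rw [pvD_small hd, pvPow_small hd]
        rw [pvSingletonSuffix]
        have hinj := pvDigitChar_inj dn hd (n % 10) (Nat.mod_lt _ (by omega))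
        rw [hinj]
        constructor
        · intro h; exact ⟨by omega, by omega⟩
        · rintro ⟨-, hm⟩; omega
      · have hd10 : 10 ≤ dn := by omega
        rw [pvD_large hd10, pvAppendSuffix]
        have hrec := IH (n / 10) (Nat.div_lt_self (by omega) (by omega))
          (by omega) (dn / 10)
        rw [hrec, pvPow_large hd10]
        have hinj := pvDigitChar_inj (dn % 10) (Nat.mod_lt _ (by omega)) (n % 10) (Nat.mod_lt _ (by omega))
        rw [hinj]
        have key : n % (10 * (10 * pvPow (dn / 10))) = 10 * ((n / 10) % (10 * pvPow (dn / 10))) + n % 10 := by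
          conv_lhs => rw [show n = 10 * (n / 10) + n % 10 by omega]
          exact pvModStep (n / 10) (n % 10) (10 * pvPow (dn / 10)) (Nat.mod_lt _ (by omega))
        rw [key]
        have hpos : 0 < 10 * pvPow (dn / 10) := by have := pvPow_pos (dn / 10); omega
        have hA : (n / 10) % (10 * pvPow (dn / 10)) < 10 * pvPow (dn / 10) := Nat.mod_lt _ hpos
        generalize (n / 10) % (10 * pvPow (dn / 10)) = A at *
        generalize pvPow (dn / 10) = P at *
        omega

theorem pvHits_of_lt {m p q dn : Nat} (h : m < p) : pvHits m p q dn = false := by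
  rw [pvHits, if_pos h]

-- the INFIX characterisation: str(dn) occurs in str(n)  ↔  the window scan pvHits succeeds
theorem pvInfixChar : ∀ n : Nat, 1 ≤ n → ∀ dn : Nat,
    (pvD dn <:+: pvD n ↔ pvHits n (pvPow dn) (10 * pvPow dn) dn = true) := by
  intro n
  induction n using Nat.strong_induction_on with
  | _ n IH =>
    intro h1 dn
    have hppos : 1 ≤ pvPow dn := pvPow_pos dn
    by_cases hn : n < 10
    · have hsing : pvD dn <:+: pvD n ↔ pvD dn <:+ pvD n := by
        rw [pvD_small hn]
        exact pvInfixSingleton _ _ (pvD_ne_nil dn)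
      rw [hsing, pvSuffixChar n h1 dn]
      rw [pvHits]
      split_ifs with hlt hmod hz
      · constructor
        · rintro ⟨h, -⟩; omega
        · intro h; exact absurd h (by simp)
      · simp only [iff_true]
        exact ⟨by omega, hmod⟩
      · omega
      · have : n / 10 = 0 := Nat.div_eq_of_lt hn
        rw [this, pvHits_of_lt (by omega)]
        constructor
        · rintro ⟨-, h⟩; exact absurd h hmod
        · intro h; exact absurd h (by simp)
    · have hn10 : 10 ≤ n := by omega
      rw [pvD_large hn10, pvInfixConcat, ← pvD_large hn10]
      rw [pvSuffixChar n h1 dn]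
      rw [IH (n / 10) (Nat.div_lt_self (by omega) (by omega)) (by omega) dn]
      conv_rhs => rw [pvHits]
      split_ifs with hlt hmod hz
      · rw [pvHits_of_lt (show n / 10 < pvPow dn by omega)]
        constructor
        · rintro (⟨h, -⟩ | h)
          · omega
          · exact absurd h (by simp)
        · intro h; exact absurd h (by simp)
      · simp only [iff_true]
        exact Or.inl ⟨by omega, hmod⟩
      · omega
      · constructor
        · rintro (⟨-, h⟩ | h)
          · exact absurd h hmod
          · exact h
        · intro h; exact Or.inr h

-- the two membership tests agree on every n ≥ 1
theorem pvPredEq (d n : Int) (hn : 1 ≤ n) :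
    PySem.Str.isIn (PySem.Int.toStr d) (PySem.Int.toStr n) =
      (if d < 0 then false
       else pvHits n.toNat (pvPow d.toNat) (10 * pvPow d.toNat) d.toNat) := by
  have hnl : (PySem.Int.toStr n).toList = pvD n.toNat := by
    rw [PySem.Int.toList_toStr, pvToChars_nonneg n (by omega)]
  split_ifs with hd
  · -- d < 0: str(d) starts with '-', which never occurs in str(n) for n ≥ 1
    apply Bool.eq_false_iff.mpr
    intro h
    have hinf := (PySem.Str.isIn_iff_infix _ _).mp h
    rw [PySem.Int.toList_toStr, hnl] at hinf
    unfold PySem.Int.toChars at hinf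
    rw [if_pos hd] at hinf
    exact pvD_no_dash n.toNat (hinf.subset (by simp))
  · have hdl : (PySem.Int.toStr d).toList = pvD d.toNat := by
      rw [PySem.Int.toList_toStr, pvToChars_nonneg d (by omega)]
    apply Bool.eq_iff_iff.mpr
    rw [PySem.Str.isIn_iff_infix, hdl, hnl]
    exact pvInfixChar n.toNat (by omega) d.toNat

theorem pvFoldlConst (l : List Int) (st : Int × Int × Int) :
    l.foldl (fun s _ => s) st = st := by
  induction l generalizing st with
  | nil => rfl
  | cons a t ih => exact ih st

-- ===== VERDICT (by name: the statement is the Claim_ definition above) =====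
theorem numbers_with_digit_inside_spec : Claim_equal_numbers_with_digit_inside := by
  intro x d _
  unfold Spec_numbers_with_digit_inside numbers_with_digit_inside numbers_with_digit_inside_alt
  by_cases hd : d < 0
  · rw [if_pos hd]
    have heq : List.foldl (fun (st : Int × Int × Int) num =>
          if PySem.Str.isIn (PySem.Int.toStr d) (PySem.Int.toStr num) then
            (st.1 + 1, st.2.1 + num, st.2.2 * num)
          else st) (0, 0, 1) (PySem.List.pyRange 1 (x + 1) 1)
        = List.foldl (fun (st : Int × Int × Int) _ => st) (0, 0, 1)
            (PySem.List.pyRange 1 (x + 1) 1) :=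
      PySem.List.foldl_congr_mem _ _ _ _ (by
        intro acc num hmem
        have h1 : (1 : Int) ≤ num := (PySem.List.mem_pyRange_one.mp hmem).1
        rw [pvPredEq d num h1, if_pos hd]
        simp)
    simp only [heq, pvFoldlConst]
  · rw [if_neg hd]
    have heq : List.foldl (fun (st : Int × Int × Int) num =>
          if PySem.Str.isIn (PySem.Int.toStr d) (PySem.Int.toStr num) then
            (st.1 + 1, st.2.1 + num, st.2.2 * num)
          else st) (0, 0, 1) (PySem.List.pyRange 1 (x + 1) 1)
        = List.foldl (fun (st : Int × Int × Int) n =>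
            if pvHits n.toNat (pvPow d.toNat) (10 * pvPow d.toNat) d.toNat then
              (st.1 + 1, st.2.1 + n, st.2.2 * n)
            else st) (0, 0, 1) (PySem.List.pyRange 1 (x + 1) 1) :=
      PySem.List.foldl_congr_mem _ _ _ _ (by
        intro acc num hmem
        have h1 : (1 : Int) ≤ num := (PySem.List.mem_pyRange_one.mp hmem).1
        rw [pvPredEq d num h1, if_neg hd])
    simp only [heq]
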